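-- pv_equiv track=rewrite | github.com/va-av-8/rational-negotiator | negotiator.py | adjust_for_batna
-- ===== SOURCE A (Python) =====
-- def calculate_value(allocation: list[int], valuations: list[int]) -> int:
--     """Calculate total value of an allocation given valuations."""
--     return sum(a * v for a, v in zip(allocation, valuations))
--
-- def adjust_for_batna(
--     allocation_self: list[int],
--     allocation_other: list[int],
--     quantities: list[int],
--     valuations_self: list[int],
--     batna_self: int
-- ) -> tuple[list[int] | None, list[int] | None]:
--     """
--     Minimally adjust offer so that my value >= batna_self (M2).
--     Takes items from opponent starting with most valuable for us.
--     Returns (None, None) if M2 cannot be satisfied -> WALK.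
--     """
--     allocation_self = list(allocation_self)
--     allocation_other = list(allocation_other)
--
--     while calculate_value(allocation_self, valuations_self) < batna_self:
--         taken = False
--         # Take most valuable items first
--         for i in sorted(range(len(valuations_self)),
--                         key=lambda i: valuations_self[i], reverse=True):
--             if allocation_other[i] > 0:
--                 allocation_other[i] -= 1
--                 allocation_self[i] += 1
--                 taken = True
--                 break
--         if not taken:
--             return None, None
--
--     return allocation_self, allocation_other
-- ===== SOURCE B (Python) =====
-- def adjust_for_batna(
--     allocation_self: list[int],
--     allocation_other: list[int],
--     quantities: list[int],
--     valuations_self: list[int],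
--     batna_self: int
-- ) -> tuple[list[int] | None, list[int] | None]:
--     """
--     Minimally adjust offer so that my value >= batna_self (M2).
--     One pass over the item indices sorted once by valuation (descending),
--     taking in bulk min(stock, ceil(deficit/value)) units per item.
--     Returns (None, None) if M2 cannot be satisfied -> WALK.
--     """
--     alloc_self = list(allocation_self)
--     alloc_other = list(allocation_other)
--     deficit = batna_self - sum(a * v for a, v in zip(alloc_self, valuations_self))
--     if deficit <= 0:
--         return alloc_self, alloc_other
--     order = sorted(range(len(valuations_self)),
--                    key=lambda i: valuations_self[i], reverse=True)
--     for i in order: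
--         v = valuations_self[i]
--         if v <= 0:
--             # everything still available is worth <= 0: value can never reach batna
--             return None, None
--         stock = alloc_other[i]
--         if stock <= 0:
--             continue
--         take = min(stock, -(-deficit // v))   # ceil(deficit / v)
--         alloc_other[i] -= take
--         alloc_self[i] += take
--         deficit -= take * v
--         if deficit <= 0:
--             return alloc_self, alloc_other
--     return None, None
-- ===== Notes on version B (the rewrite author's own statement) =====
-- stated objective: alternative
-- what changed: Instead of A's while-loop that re-sorts the indices and transfers one unit per iteration until the BATNA is met, B sorts the indices once, computes the deficit once, and in a single bulk-taking pass takes min(stock, ceil(deficit/value)) units per item (returning (None,None) as soon as the best remaining valuation is <= 0); the unit-by-unit loop disappears.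
-- outside the precondition, e.g. on adjust_for_batna([0], [5], [], [1, 1], 3): A returns ([3], [2]), B returns ([3], [2])
import Mathlib
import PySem

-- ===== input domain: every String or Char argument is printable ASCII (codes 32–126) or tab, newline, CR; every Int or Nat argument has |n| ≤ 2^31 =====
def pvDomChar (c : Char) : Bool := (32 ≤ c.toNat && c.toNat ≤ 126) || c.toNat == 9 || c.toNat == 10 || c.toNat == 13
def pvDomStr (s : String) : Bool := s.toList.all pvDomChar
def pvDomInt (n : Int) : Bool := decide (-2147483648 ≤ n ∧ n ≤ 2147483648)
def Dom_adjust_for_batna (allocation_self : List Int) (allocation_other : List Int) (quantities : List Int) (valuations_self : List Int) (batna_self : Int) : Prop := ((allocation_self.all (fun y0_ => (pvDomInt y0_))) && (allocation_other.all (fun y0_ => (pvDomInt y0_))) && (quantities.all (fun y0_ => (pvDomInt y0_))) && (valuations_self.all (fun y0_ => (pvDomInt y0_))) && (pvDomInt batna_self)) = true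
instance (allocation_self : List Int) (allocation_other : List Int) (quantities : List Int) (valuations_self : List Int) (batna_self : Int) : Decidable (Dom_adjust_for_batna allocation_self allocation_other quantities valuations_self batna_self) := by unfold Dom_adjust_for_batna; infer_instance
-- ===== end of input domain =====

-- B replaces A's unit-by-unit while-loop (which re-sorts the indices every iteration) by one sort,
-- one deficit computation and a single bulk-taking pass (an alternative algorithm, same result).

-- ===== PORT A =====
-- sum(a * v for a, v in zip(allocation, valuations))
def calculate_value (allocation : List Int) (valuations : List Int) : Int :=
  (List.zip allocation valuations).foldl (fun acc av => acc + av.1 * av.2) 0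

-- sorted(range(len(valuations_self)), key=lambda i: valuations_self[i], reverse=True)
-- (shared helper: Source A and Source B contain this exact call; key indices come from range(n), always in range)
def sortedIdx (vals : List Int) : List Int :=
  PySem.List.sorted (PySem.List.pyRange 0 (vals.length : Int) 1) (fun i => PySem.List.pyGetD vals i 0) true

-- the 'for i in …: if allocation_other[i] > 0: … break' scan: first index with positive stock
-- (pyGetD: Python raises IndexError for an out-of-range i; those inputs are excluded by Pre_)
def aFind (o : List Int) : List Int → Option Int
  | [] => none
  | i :: is => if 0 < PySem.List.pyGetD o i 0 then some i else aFind o is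

-- helper facts the while-loop's termination argument cites
theorem pyGetD_toNat_of_nonneg (xs : List Int) (i : Int) (d : Int) (h : 0 ≤ i) :
    PySem.List.pyGetD xs i d = xs.getD i.toNat d := by
  have h2 : i = ((i.toNat : Nat) : Int) := by omega
  rw [h2, PySem.List.pyGetD_natCast]
  have h3 : max i 0 = i := by omega
  simp [List.getD, h3]

theorem getD_pos_lt_length (xs : List Int) (k : Nat) (h : 0 < xs.getD k 0) : k < xs.length := by
  by_contra hc
  rw [List.getD_eq_default] at h
  · omega
  · omega

theorem musum_set_lt (o : List Int) (k : Nat) (h : k < o.length) (hp : 0 < o.getD k 0) :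
    ((o.set k (o.getD k 0 - 1)).map Int.toNat).sum < (o.map Int.toNat).sum := by
  induction o generalizing k with
  | nil => simp at h
  | cons a t ih =>
    cases k with
    | zero => simp at hp ⊢; omega
    | succ m =>
      simp only [List.length_cons] at h
      simp only [List.getD_cons_succ] at hp
      simp only [List.set_cons_succ, List.map_cons, List.sum_cons, List.getD_cons_succ]
      have := ih m (by omega) hp
      omega

theorem aFind_some (o : List Int) (l : List Int) (i : Int) (h : aFind o l = some i) :
    i ∈ l ∧ 0 < PySem.List.pyGetD o i 0 := by
  induction l with
  | nil => simp [aFind] at h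
  | cons j js ih =>
    by_cases hj : 0 < PySem.List.pyGetD o j 0
    · simp [aFind, hj] at h
      subst h; exact ⟨List.mem_cons_self, hj⟩
    · simp [aFind, hj] at h
      obtain ⟨h1, h2⟩ := ih h
      exact ⟨List.mem_cons_of_mem _ h1, h2⟩

theorem mem_sortedIdx (vals : List Int) (i : Int) :
    i ∈ sortedIdx vals ↔ 0 ≤ i ∧ i < (vals.length : Int) := by
  rw [sortedIdx, PySem.List.mem_sorted, PySem.List.mem_pyRange_one]

-- the 'while calculate_value(...) < batna_self' loop of A
def aLoop (vals : List Int) (batna : Int) (s : List Int) (o : List Int) :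
    Option (List Int) × Option (List Int) :=
  if calculate_value s vals < batna then
    match _h : aFind o (sortedIdx vals) with
    | none => (none, none)
    | some i =>
        aLoop vals batna
          (PySem.List.pySetD s i (PySem.List.pyGetD s i 0 + 1))
          (PySem.List.pySetD o i (PySem.List.pyGetD o i 0 - 1))
  else (some s, some o)
termination_by (o.map Int.toNat).sum
decreasing_by
  obtain ⟨hmem, hpos⟩ := aFind_some o (sortedIdx vals) i _h
  have hi0 : 0 ≤ i := ((mem_sortedIdx vals i).mp hmem).1
  rw [pyGetD_toNat_of_nonneg _ _ _ hi0] at hpos ⊢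
  rw [PySem.List.pySetD_of_nonneg o _ hi0]
  exact musum_set_lt o i.toNat (getD_pos_lt_length o i.toNat hpos) hpos

def adjust_for_batna (allocation_self : List Int) (allocation_other : List Int) (quantities : List Int) (valuations_self : List Int) (batna_self : Int) : Option (List Int) × Option (List Int) :=
  aLoop valuations_self batna_self allocation_self allocation_other

-- ===== PORT B =====
-- the single bulk-taking pass of Source B over the (already sorted) index list
def bLoop (vals : List Int) (s : List Int) (o : List Int) (deficit : Int) :
    List Int → Option (List Int) × Option (List Int)
  | [] => (none, none)
  | i :: rest =>
    let v := PySem.List.pyGetD vals i 0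
    if v ≤ 0 then (none, none)
    else
      let stock := PySem.List.pyGetD o i 0
      if stock ≤ 0 then bLoop vals s o deficit rest
      else
        let take := min stock (-(PySem.Int.floordiv (-deficit) v))
        let s' := PySem.List.pySetD s i (PySem.List.pyGetD s i 0 + take)
        let o' := PySem.List.pySetD o i (stock - take)
        let d' := deficit - take * v
        if d' ≤ 0 then (some s', some o') else bLoop vals s' o' d' rest

def adjust_for_batna_alt (allocation_self : List Int) (allocation_other : List Int) (quantities : List Int) (valuations_self : List Int) (batna_self : Int) : Option (List Int) × Option (List Int) :=
  let deficit := batna_self - calculate_value allocation_self valuations_self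
  if deficit ≤ 0 then (some allocation_self, some allocation_other)
  else bLoop valuations_self allocation_self allocation_other deficit (sortedIdx valuations_self)

-- ===== PRECONDITION & SPEC =====
-- Pre_ excludes inputs whose allocation lists are shorter than valuations_self while the initial value
-- is below batna: there A's loop can index past the end of a list (IndexError); the bound also excludes
-- some short-list inputs on which A happens to return before touching an out-of-range index.
def Pre_adjust_for_batna (allocation_self : List Int) (allocation_other : List Int) (quantities : List Int) (valuations_self : List Int) (batna_self : Int) : Prop :=
  (valuations_self.length ≤ allocation_self.length ∧ valuations_self.length ≤ allocation_other.length)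
  ∨ batna_self ≤ (List.zipWith (fun a v => a * v) allocation_self valuations_self).sum
instance (allocation_self : List Int) (allocation_other : List Int) (quantities : List Int) (valuations_self : List Int) (batna_self : Int) : Decidable (Pre_adjust_for_batna allocation_self allocation_other quantities valuations_self batna_self) := by unfold Pre_adjust_for_batna; infer_instance

def pvWitness_adjust_for_batna : List Int × List Int × List Int × List Int × Int :=
  ([0, 0], [2, 1], [1, 1], [3, 1], 4)

def Spec_adjust_for_batna (allocation_self : List Int) (allocation_other : List Int) (quantities : List Int) (valuations_self : List Int) (batna_self : Int) (out : Option (List Int) × Option (List Int)) : Prop := out = adjust_for_batna_alt allocation_self allocation_other quantities valuations_self batna_self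
instance (allocation_self : List Int) (allocation_other : List Int) (quantities : List Int) (valuations_self : List Int) (batna_self : Int) (out : Option (List Int) × Option (List Int)) : Decidable (Spec_adjust_for_batna allocation_self allocation_other quantities valuations_self batna_self out) := by unfold Spec_adjust_for_batna; infer_instance

-- ===== CLAIM (what is proved, stated in full; the proofs are below) =====
def Claim_equal_adjust_for_batna : Prop := ∀ (allocation_self : List Int) (allocation_other : List Int) (quantities : List Int) (valuations_self : List Int) (batna_self : Int), Dom_adjust_for_batna allocation_self allocation_other quantities valuations_self batna_self → Pre_adjust_for_batna allocation_self allocation_other quantities valuations_self batna_self → Spec_adjust_for_batna allocation_self allocation_other quantities valuations_self batna_self (adjust_for_batna allocation_self allocation_other quantities valuations_self batna_self)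

-- ===== LEMMAS AND PROOFS =====

theorem cv_eq (s vals : List Int) :
    calculate_value s vals = (List.zipWith (fun a v => a * v) s vals).sum := by
  rw [calculate_value, PySem.List.foldl_add (List.zip s vals) (fun av => av.1 * av.2) 0]
  have : (List.zip s vals).map (fun av => av.1 * av.2) = List.zipWith (fun a v => a * v) s vals := by
    induction s generalizing vals with
    | nil => simp
    | cons a t ih => cases vals <;> simp [ih]
  rw [this]; ring

theorem zw_set (s vals : List Int) (k : Nat) (d : Int) (hk : k < s.length) (hkv : k < vals.length) :
    (List.zipWith (fun a v => a * v) (s.set k (s.getD k 0 + d)) vals).sum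
      = (List.zipWith (fun a v => a * v) s vals).sum + d * vals.getD k 0 := by
  induction s generalizing vals k with
  | nil => simp at hk
  | cons a t ih =>
    cases vals with
    | nil => simp at hkv
    | cons b u =>
      cases k with
      | zero => simp; ring
      | succ m =>
        simp only [List.length_cons] at hk hkv
        simp only [List.getD_cons_succ, List.set_cons_succ, List.zipWith_cons_cons, List.sum_cons]
        rw [ih u m (by omega) (by omega)]
        ring

theorem getD_set_ne (xs : List Int) (k m : Nat) (v d : Int) (hne : m ≠ k) : (xs.set k v).getD m d = xs.getD m d := by
  simp [List.getD, List.getElem?_set, Ne.symm hne]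

theorem getD_set_self (xs : List Int) (k : Nat) (v d : Int) (h : k < xs.length) : (xs.set k v).getD k d = v := by
  simp [List.getD, h]

theorem pairwise_sortedIdx (vals : List Int) :
    (sortedIdx vals).Pairwise (fun a b => PySem.List.pyGetD vals b 0 ≤ PySem.List.pyGetD vals a 0) := by
  exact PySem.List.sorted_pairwise_rev _ _

theorem nodup_sortedIdx (vals : List Int) : (sortedIdx vals).Nodup := by
  exact ((PySem.List.sorted_perm _ _ _).nodup_iff).mpr (PySem.List.nodup_pyRange_one _ _)

theorem aFind_none (o : List Int) (l : List Int) (h : ∀ j ∈ l, PySem.List.pyGetD o j 0 ≤ 0) :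
    aFind o l = none := by
  induction l with
  | nil => rfl
  | cons j js ih =>
    have hj := h j List.mem_cons_self
    simp [aFind, show ¬ (0 < PySem.List.pyGetD o j 0) by omega]
    exact ih (fun x hx => h x (List.mem_cons_of_mem _ hx))

theorem aFind_first (o : List Int) (pre rest : List Int) (i : Int)
    (hpre : ∀ j ∈ pre, PySem.List.pyGetD o j 0 ≤ 0) (hi : 0 < PySem.List.pyGetD o i 0) :
    aFind o (pre ++ i :: rest) = some i := by
  induction pre with
  | nil => simp [aFind, hi]
  | cons j js ih =>
    have hj := hpre j List.mem_cons_self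
    simp [aFind, show ¬ (0 < PySem.List.pyGetD o j 0) by omega]
    exact ih (fun x hx => hpre x (List.mem_cons_of_mem _ hx))

theorem drain (vals : List Int) (batna : Int) :
    ∀ N (s o : List Int), (o.map Int.toNat).sum ≤ N →
    vals.length ≤ s.length → vals.length ≤ o.length →
    (List.zipWith (fun a v => a * v) s vals).sum < batna →
    (∀ i ∈ sortedIdx vals, 0 < PySem.List.pyGetD o i 0 → PySem.List.pyGetD vals i 0 ≤ 0) →
    aLoop vals batna s o = (none, none) := by
  intro N
  induction N using Nat.strong_induction_on with
  | _ N ih =>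
    intro s o hN hs ho hval hbad
    rw [aLoop]
    have hcv : calculate_value s vals < batna := by rw [cv_eq]; exact hval
    simp only [hcv, if_true]
    cases hfind : aFind o (sortedIdx vals) with
    | none => rfl
    | some i =>
      show aLoop vals batna (PySem.List.pySetD s i (PySem.List.pyGetD s i 0 + 1))
        (PySem.List.pySetD o i (PySem.List.pyGetD o i 0 - 1)) = (none, none)
      obtain ⟨hmem, hpos⟩ := aFind_some o (sortedIdx vals) i hfind
      obtain ⟨hi0, hin⟩ := (mem_sortedIdx vals i).mp hmem
      have hk : i.toNat < vals.length := by omega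
      rw [pyGetD_toNat_of_nonneg _ _ _ hi0] at hpos
      have hko : i.toNat < o.length := getD_pos_lt_length o i.toNat hpos
      rw [PySem.List.pySetD_of_nonneg s _ hi0, PySem.List.pySetD_of_nonneg o _ hi0,
          pyGetD_toNat_of_nonneg s _ _ hi0, pyGetD_toNat_of_nonneg o _ _ hi0]
      apply ih ((o.set i.toNat (o.getD i.toNat 0 - 1)).map Int.toNat).sum
        (by have := musum_set_lt o i.toNat hko hpos; omega) _ _ (le_refl _)
        (by simpa using hs) (by simpa using ho)
      · rw [zw_set s vals i.toNat 1 (by omega) hk]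
        have hvi := hbad i hmem (by rw [pyGetD_toNat_of_nonneg _ _ _ hi0]; exact hpos)
        rw [pyGetD_toNat_of_nonneg _ _ _ hi0] at hvi
        have : (1 : Int) * vals.getD i.toNat 0 = vals.getD i.toNat 0 := by ring
        omega
      · intro j hj hjpos
        obtain ⟨hj0, hjn⟩ := (mem_sortedIdx vals j).mp hj
        rw [pyGetD_toNat_of_nonneg _ _ _ hj0] at hjpos
        by_cases hjk : j.toNat = i.toNat
        · have hji : j = i := by omega
          subst hji
          rw [getD_set_self o j.toNat _ 0 hko] at hjpos
          exact hbad j hj (by rw [pyGetD_toNat_of_nonneg _ _ _ hj0]; omega)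
        · rw [getD_set_ne o i.toNat j.toNat _ 0 hjk] at hjpos
          exact hbad j hj (by rw [pyGetD_toNat_of_nonneg _ _ _ hj0]; exact hjpos)

theorem bStep (vals : List Int) (s o : List Int) (d : Int) (i : Int) (rest : List Int)
    (hi0 : 0 ≤ i) (hiv : i.toNat < vals.length) (his : i.toNat < s.length) (hio : i.toNat < o.length)
    (hv : 0 < PySem.List.pyGetD vals i 0) (hst : 0 < PySem.List.pyGetD o i 0)
    (hd : 0 < d - PySem.List.pyGetD vals i 0) :
    bLoop vals s o d (i :: rest)
      = bLoop vals (PySem.List.pySetD s i (PySem.List.pyGetD s i 0 + 1))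
          (PySem.List.pySetD o i (PySem.List.pyGetD o i 0 - 1))
          (d - PySem.List.pyGetD vals i 0) (i :: rest) := by
  have GG : ∀ (xs : List Int) (dd : Int), PySem.List.pyGetD xs i dd = xs.getD i.toNat dd :=
    fun xs dd => pyGetD_toNat_of_nonneg xs i dd hi0
  have SS : ∀ (xs : List Int) (v : Int), PySem.List.pySetD xs i v = xs.set i.toNat v :=
    fun xs v => PySem.List.pySetD_of_nonneg xs v hi0
  simp only [GG] at hv hst hd
  simp only [bLoop, GG, SS]
  set k := i.toNat with hk
  set v := vals.getD k 0 with hvdef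
  set stock := o.getD k 0 with hstdef
  have hnv : ¬ (v ≤ 0) := by omega
  simp only [hnv, if_false]
  -- ceiling bounds
  set c := -PySem.Int.floordiv (-d) v with hcdef
  have hcb : (c - 1) * v < d ∧ d ≤ c * v :=
    (PySem.Int.neg_floordiv_neg_eq_iff_of_pos hv).mp rfl
  have hc2 : 2 ≤ c := by nlinarith [hcb.1, hcb.2]
  have hc' : -PySem.Int.floordiv (-(d - v)) v = c - 1 := by
    refine (PySem.Int.neg_floordiv_neg_eq_iff_of_pos hv).mpr ⟨?_, ?_⟩
    · nlinarith [hcb.1]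
    · nlinarith [hcb.2]
  rw [hc']
  have hsetD : (o.set k (stock - 1)).getD k 0 = stock - 1 := getD_set_self o k _ 0 hio
  have hsetDs : (s.set k (s.getD k 0 + 1)).getD k 0 = s.getD k 0 + 1 := getD_set_self s k _ 0 his
  rw [hsetD, hsetDs]
  have hns : ¬ (stock ≤ 0) := by omega
  simp only [hns, if_false]
  by_cases h1 : stock - 1 ≤ 0
  · -- stock = 1: LHS takes 1 unit and recurses; RHS skips the emptied item
    have hstock1 : stock = 1 := by omega
    have htake : min stock c = 1 := by omega
    rw [htake]
    simp only [h1, if_true]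
    have hone : (1:Int) * v = v := by ring
    have hnd : ¬ (d - 1 * v ≤ 0) := by omega
    simp only [hnd, if_false]
    rw [hstock1]
    norm_num
  · -- stock ≥ 2: both sides take from item i; the two bulk takes differ by the single unit
    simp only [h1, if_false]
    set t' := min (stock - 1) (c - 1) with ht'def
    have htake : min stock c = t' + 1 := by omega
    rw [htake]
    have e2 : d - (t' + 1) * v = d - v - t' * v := by ring
    rw [e2]
    have e3 : (s.set k (s.getD k 0 + 1)).set k (s.getD k 0 + 1 + t') = s.set k (s.getD k 0 + (t' + 1)) := by
      rw [List.set_set]; ring_nf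
    have e4 : (o.set k (stock - 1)).set k (stock - 1 - t') = o.set k (stock - (t' + 1)) := by
      rw [List.set_set]; ring_nf
    rw [e3, e4]

theorem main_lemma (vals : List Int) (batna : Int) :
    ∀ N (pre rest : List Int) (s o : List Int),
    (o.map Int.toNat).sum + rest.length ≤ N →
    sortedIdx vals = pre ++ rest →
    (∀ j ∈ pre, PySem.List.pyGetD o j 0 ≤ 0) →
    (List.zipWith (fun a v => a * v) s vals).sum < batna →
    vals.length ≤ s.length → vals.length ≤ o.length →
    aLoop vals batna s o
      = bLoop vals s o (batna - (List.zipWith (fun a v => a * v) s vals).sum) rest := by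
  intro N
  induction N using Nat.strong_induction_on with
  | _ N ih =>
    intro pre rest s o hN hdec hpre hval hs ho
    have hcv : calculate_value s vals < batna := by rw [cv_eq]; exact hval
    cases rest with
    | nil =>
      rw [aLoop]
      simp only [hcv, if_true]
      have hfn : aFind o (sortedIdx vals) = none := by
        apply aFind_none
        intro j hj
        rw [hdec, List.append_nil] at hj
        exact hpre j hj
      cases hfind : aFind o (sortedIdx vals) with
      | none => rfl
      | some i => rw [hfn] at hfind; cases hfind
    | cons i rest' =>
      have hmemi : i ∈ sortedIdx vals := by rw [hdec]; simp
      obtain ⟨hi0, hin⟩ := (mem_sortedIdx vals i).mp hmemi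
      have hk : i.toNat < vals.length := by omega
      have his : i.toNat < s.length := by omega
      have hio : i.toNat < o.length := by omega
      have GG : ∀ (xs : List Int) (dd : Int), PySem.List.pyGetD xs i dd = xs.getD i.toNat dd :=
        fun xs dd => pyGetD_toNat_of_nonneg xs i dd hi0
      have SS : ∀ (xs : List Int) (v : Int), PySem.List.pySetD xs i v = xs.set i.toNat v :=
        fun xs v => PySem.List.pySetD_of_nonneg xs v hi0
      by_cases hvle : PySem.List.pyGetD vals i 0 ≤ 0
      · -- best remaining valuation ≤ 0: B answers (none, none), A drains to (none, none)
        have hb : bLoop vals s o (batna - (List.zipWith (fun a v => a * v) s vals).sum) (i :: rest')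
            = (none, none) := by
          simp only [bLoop]
          rw [if_pos hvle]
        rw [hb]
        apply drain vals batna ((o.map Int.toNat).sum) s o le_rfl hs ho hval
        intro j hj hjpos
        rw [hdec] at hj
        rcases List.mem_append.mp hj with hjp | hjc
        · exact absurd hjpos (by have := hpre j hjp; omega)
        · rcases List.mem_cons.mp hjc with rfl | hjr
          · exact hvle
          · have hpw := pairwise_sortedIdx vals
            rw [hdec] at hpw
            have h2 := (List.pairwise_append.mp hpw).2.1
            have h3 := (List.pairwise_cons.mp h2).1 j hjr
            omega
      · push_neg at hvle
        rw [GG] at hvle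
        by_cases hstle : PySem.List.pyGetD o i 0 ≤ 0
        · -- no stock at i: B skips to rest', A is unchanged
          have hb : bLoop vals s o (batna - (List.zipWith (fun a v => a * v) s vals).sum) (i :: rest')
              = bLoop vals s o (batna - (List.zipWith (fun a v => a * v) s vals).sum) rest' := by
            simp only [bLoop]
            rw [if_neg (by rw [GG]; omega), if_pos hstle]
          rw [hb]
          apply ih ((o.map Int.toNat).sum + rest'.length) (by simp at hN; omega) (pre ++ [i]) rest' s o le_rfl
            (by rw [hdec]; simp)
            (by intro j hj
                rcases List.mem_append.mp hj with hjp | hjc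
                · exact hpre j hjp
                · rcases List.mem_singleton.mp hjc with rfl
                  exact hstle)
            hval hs ho
        · push_neg at hstle
          have hstleP := hstle
          rw [GG] at hstle
          have hfa : aFind o (sortedIdx vals) = some i := by
            rw [hdec]; exact aFind_first o pre rest' i hpre hstleP
          rw [aLoop]
          simp only [hcv, if_true]
          cases hfind : aFind o (sortedIdx vals) with
          | none => rw [hfa] at hfind; cases hfind
          | some i' =>
            have hii : i' = i := by rw [hfa] at hfind; injection hfind; omega
            subst hii
            show aLoop vals batna (PySem.List.pySetD s i' (PySem.List.pyGetD s i' 0 + 1))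
              (PySem.List.pySetD o i' (PySem.List.pyGetD o i' 0 - 1))
              = bLoop vals s o (batna - (List.zipWith (fun a v => a * v) s vals).sum) (i' :: rest')
            have hnewval : (List.zipWith (fun a v => a * v)
                  (s.set i'.toNat (s.getD i'.toNat 0 + 1)) vals).sum
                = (List.zipWith (fun a v => a * v) s vals).sum + vals.getD i'.toNat 0 := by
              rw [zw_set s vals i'.toNat 1 his hk]; ring
            by_cases hdone : batna - (List.zipWith (fun a v => a * v) s vals).sum
                - vals.getD i'.toNat 0 ≤ 0
            · -- this single unit already meets batna: A's loop stops, B's take is 1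
              rw [aLoop]
              have hcv2 : ¬ (calculate_value (PySem.List.pySetD s i' (PySem.List.pyGetD s i' 0 + 1)) vals < batna) := by
                rw [cv_eq, GG, SS, hnewval]; omega
              simp only [hcv2, if_false]
              have hc1 : -PySem.Int.floordiv
                  (-(batna - (List.zipWith (fun a v => a * v) s vals).sum)) (vals.getD i'.toNat 0) = 1 := by
                refine (PySem.Int.neg_floordiv_neg_eq_iff_of_pos (by omega)).mpr ⟨?_, ?_⟩
                · rw [show ((1:Int) - 1) * vals.getD i'.toNat 0 = 0 from by ring]; omega
                · rw [show (1:Int) * vals.getD i'.toNat 0 = vals.getD i'.toNat 0 from by ring]; omega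
              simp only [bLoop, GG, SS]
              rw [if_neg (by omega), if_neg (by omega), hc1]
              have htake : min (o.getD i'.toNat 0) 1 = 1 := by omega
              rw [htake]
              rw [if_pos (by rw [show (1:Int) * vals.getD i'.toNat 0 = vals.getD i'.toNat 0 from by ring]; omega)]
            · -- more units needed: one A-step equals the bStep state change; induction
              push_neg at hdone
              have hstep := bStep vals s o (batna - (List.zipWith (fun a v => a * v) s vals).sum) i' rest'
                hi0 hk his hio (by rw [GG]; omega) (by rw [GG]; omega) (by rw [GG]; omega)
              rw [hstep]
              have hdrop := musum_set_lt o i'.toNat hio (by omega)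
              have heq1 : batna - (List.zipWith (fun a v => a * v)
                  (s.set i'.toNat (s.getD i'.toNat 0 + 1)) vals).sum
                = batna - (List.zipWith (fun a v => a * v) s vals).sum - vals.getD i'.toNat 0 := by
                rw [hnewval]; ring
              simp only [GG, SS]
              rw [← heq1]
              have hnod : i' ∉ pre := by
                have hnd := nodup_sortedIdx vals
                rw [hdec] at hnd
                exact fun hmem => (List.disjoint_of_nodup_append hnd) hmem List.mem_cons_self
              refine ih (((o.set i'.toNat (o.getD i'.toNat 0 - 1)).map Int.toNat).sum + (i' :: rest').length)
                (by simp only [List.length_cons] at hN ⊢; omega) pre (i' :: rest')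
                (s.set i'.toNat (s.getD i'.toNat 0 + 1)) (o.set i'.toNat (o.getD i'.toNat 0 - 1))
                le_rfl hdec ?_ (by rw [hnewval]; omega) (by simpa using hs) (by simpa using ho)
              intro j hj
              have hjmem : j ∈ sortedIdx vals := by rw [hdec]; exact List.mem_append_left _ hj
              obtain ⟨hj0, hjn⟩ := (mem_sortedIdx vals j).mp hjmem
              rw [pyGetD_toNat_of_nonneg _ _ _ hj0]
              have hjne : j.toNat ≠ i'.toNat := by
                intro hc
                exact hnod (by rwa [show j = i' from by omega] at hj)
              rw [getD_set_ne o i'.toNat j.toNat _ 0 hjne]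
              have := hpre j hj
              rw [pyGetD_toNat_of_nonneg _ _ _ hj0] at this
              exact this
        

-- ===== VERDICT (by name: the statement is the Claim_ definition above) =====
theorem adjust_for_batna_spec : Claim_equal_adjust_for_batna := by
  intro s o q vals batna _hdom hpre
  unfold Spec_adjust_for_batna adjust_for_batna adjust_for_batna_alt
  by_cases hv : batna ≤ calculate_value s vals
  · rw [aLoop]
    simp [show ¬ (calculate_value s vals < batna) by omega, show batna - calculate_value s vals ≤ 0 by omega]
  · have hzv : (List.zipWith (fun a v => a * v) s vals).sum < batna := by
      rw [← cv_eq]; omega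
    obtain ⟨hs, ho⟩ : vals.length ≤ s.length ∧ vals.length ≤ o.length := by
      rcases hpre with h | h
      · exact h
      · exact absurd h (by rw [← cv_eq] at h; omega)
    simp only [show ¬ (batna - calculate_value s vals ≤ 0) by omega, if_false]
    rw [cv_eq]
    exact main_lemma vals batna ((o.map Int.toNat).sum + (sortedIdx vals).length)
      [] (sortedIdx vals) s o (le_refl _) (by simp) (by simp) hzv hs ho
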